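-- pv_equiv track=rewrite | github.com/Breadinator/aoc | 2024/day1/python/part2.py | calculate
-- ===== SOURCE A (Python) =====
-- from typing import Optional
--
-- def calculate(left: list[int], right: list[int]):
--     sum = 0
--     current_num: Optional[int] = None
--     current_sum: Optional[int] = None
--     for num in left:
--         if current_num and num == current_num and current_sum:
--             sum += current_sum
--             continue
--         current_num = num
--         current_sum = 0
--         for num2 in right:
--             if num2 == num:
--                 current_sum += num
--         sum += current_sum
--     return sum
-- ===== SOURCE B (Python) =====
-- def calculate(left: list[int], right: list[int]):
--     counts = {}
--     for n in right:
--         counts[n] = counts.get(n, 0) + 1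
--     total = 0
--     for n in left:
--         total += n * counts.get(n, 0)
--     return total
-- ===== Notes on version B (the rewrite author's own statement) =====
-- stated objective: faster
-- what changed: B builds a count dictionary over right in one pass and then sums n*count per left element, replacing A's inner scan of right for each left element (with its truthiness-guarded memo of the previous element).
import Mathlib
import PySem

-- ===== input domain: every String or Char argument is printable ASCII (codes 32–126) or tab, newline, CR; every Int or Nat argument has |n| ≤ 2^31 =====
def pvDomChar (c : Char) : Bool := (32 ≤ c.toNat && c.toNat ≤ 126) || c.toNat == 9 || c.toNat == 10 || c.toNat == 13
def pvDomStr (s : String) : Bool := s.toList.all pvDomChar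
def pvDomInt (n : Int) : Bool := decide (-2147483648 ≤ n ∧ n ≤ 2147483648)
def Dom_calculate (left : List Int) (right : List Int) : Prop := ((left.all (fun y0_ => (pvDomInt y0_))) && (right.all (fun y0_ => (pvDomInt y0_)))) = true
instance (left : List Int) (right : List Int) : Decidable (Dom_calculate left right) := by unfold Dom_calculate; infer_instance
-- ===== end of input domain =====

-- B replaces A's per-element inner scan of `right` by a count dictionary built once; faster (asymptotic, measured).

-- ===== PORT A =====
-- state = (sum, current_num, current_sum); the Python truthiness of `current_num and num == current_num and current_sum`
-- is ported exactly: a value is truthy iff it is some v with v ≠ 0.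
def calculateStep (right : List Int) (st : Int × Option Int × Option Int) (num : Int) :
    Int × Option Int × Option Int :=
  let s := st.1
  let cn := st.2.1
  let cs := st.2.2
  if (cn.getD 0 ≠ 0 ∧ cn ≠ none) ∧ cn = some num ∧ (cs.getD 0 ≠ 0 ∧ cs ≠ none) then
    (s + cs.getD 0, cn, cs)
  else
    let cs' := right.foldl (fun acc num2 => if num2 = num then acc + num else acc) 0
    (s + cs', some num, some cs')

def calculate (left : List Int) (right : List Int) : Int :=
  (left.foldl (calculateStep right) (0, none, none)).1

-- ===== PORT B =====
def calculate_alt (left : List Int) (right : List Int) : Int :=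
  let counts : PySem.Dict Int Int :=
    right.foldl (fun d n => d.modify n 0 (· + 1)) PySem.Dict.empty
  left.foldl (fun total n => total + n * counts.getD n 0) 0

-- ===== PRECONDITION & SPEC =====
def Spec_calculate (left : List Int) (right : List Int) (out : Int) : Prop := out = calculate_alt left right
instance (left : List Int) (right : List Int) (out : Int) : Decidable (Spec_calculate left right out) := by unfold Spec_calculate; infer_instance

-- ===== CLAIM (what is proved, stated in full; the proofs are below) =====
def Claim_equal_calculate : Prop := ∀ (left : List Int) (right : List Int), Dom_calculate left right → Spec_calculate left right (calculate left right)

-- ===== LEMMAS AND PROOFS =====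

-- A's inner loop sums `num` once per matching element of right.
theorem inner_eq_count (right : List Int) (num : Int) (a : Int) :
    right.foldl (fun acc num2 => if num2 = num then acc + num else acc) a
      = a + num * right.count num := by
  induction right generalizing a with
  | nil => simp
  | cons x xs ih =>
    by_cases h : x = num
    · subst h
      simp only [List.foldl_cons, ih, List.count_cons_self]
      push_cast; ring
    · simp only [List.foldl_cons, if_neg h, ih]
      simp only [List.count_cons]
      simp
      exact Or.inl h

-- A's fold, from any state whose memo is consistent, computes the plain sum fold.
theorem foldA_eq (right : List Int) (left : List Int) :
    ∀ (s : Int) (cn cs : Option Int),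
      (∀ u v, cn = some u → cs = some v → v = u * right.count u) →
      (left.foldl (calculateStep right) (s, cn, cs)).1
        = left.foldl (fun t n => t + n * right.count n) s := by
  induction left with
  | nil => intro s cn cs _; rfl
  | cons num rest ih =>
    intro s cn cs hInv
    by_cases hc : ((cn.getD 0 ≠ 0 ∧ cn ≠ none) ∧ cn = some num ∧ (cs.getD 0 ≠ 0 ∧ cs ≠ none))
    · have hstep : calculateStep right (s, cn, cs) num = (s + cs.getD 0, cn, cs) := by
        simp only [calculateStep]
        rw [if_pos hc]
      obtain ⟨_, hcn, _, hcsne⟩ := hc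
      obtain ⟨v, hv⟩ := Option.ne_none_iff_exists'.mp hcsne
      have hval : v = num * right.count num := hInv num v hcn hv
      rw [List.foldl_cons, List.foldl_cons, hstep, ih (s + cs.getD 0) cn cs hInv]
      simp [hv, hval]
    · have hstep : calculateStep right (s, cn, cs) num
          = (s + right.foldl (fun acc num2 => if num2 = num then acc + num else acc) 0,
             some num,
             some (right.foldl (fun acc num2 => if num2 = num then acc + num else acc) 0)) := by
        simp only [calculateStep]
        rw [if_neg hc]
      have hin : right.foldl (fun acc num2 => if num2 = num then acc + num else acc) 0
          = num * right.count num := by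
        rw [inner_eq_count]; ring
      rw [List.foldl_cons, List.foldl_cons, hstep,
        ih _ (some num) _ (by intro u v hu hv; cases hu; cases hv; exact hin), hin]

-- B's counter dictionary gives exactly the count in right.
theorem alt_eq_sum (left right : List Int) :
    calculate_alt left right = left.foldl (fun t n => t + n * right.count n) 0 := by
  show left.foldl (fun (total : Int) (n : Int) =>
      total + n * (right.foldl (fun d n => d.modify n 0 (· + 1)) PySem.Dict.empty).getD n 0) 0
      = _
  have h : (fun (total : Int) (n : Int) =>
      total + n * (right.foldl (fun d n => d.modify n 0 (· + 1)) PySem.Dict.empty).getD n 0)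
      = fun (total : Int) (n : Int) => total + n * right.count n := by
    funext total n
    rw [PySem.Dict.getD_foldl_modify_add_one, PySem.Dict.getD_empty]
    ring
  rw [h]

-- ===== VERDICT (by name: the statement is the Claim_ definition above) =====
theorem calculate_spec : Claim_equal_calculate := by
  intro left right _
  unfold Spec_calculate calculate
  rw [foldA_eq right left 0 none none (by intro u v h; cases h), alt_eq_sum]
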